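-- pv_equiv track=rewrite | github.com/birdycoder/TrajectoryPrediction | Predict.py | seqInclude
-- ===== SOURCE A (Python) =====
-- def seqInclude(seq, arr):
--     res = []
--     seq_len = len(seq)
--     for trk in arr:
--         check = True
--         pos_id = 0
--         while(check and pos_id<=(len(trk) - seq_len)):
--             if trk[pos_id:(pos_id+ seq_len)] == seq:
--                 res.append(trk)
--                 check = False
--             pos_id+=1
--     return res
-- ===== SOURCE B (Python) =====
-- def seqInclude(seq, arr):
--     n = len(seq)
--     def contains(t):
--         # peel suffixes; at each suffix do an element-wise prefix check
--         while True:
--             if n <= len(t) and all(a == b for a, b in zip(seq, t)):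
--                 return True
--             if not t:
--                 return False
--             t = t[1:]
--     return [trk for trk in arr if contains(trk)]
-- ===== Notes on version B (the rewrite author's own statement) =====
-- stated objective: alternative
-- what changed: Replaces A's index-and-slice scan (building trk[pos:pos+n] and comparing whole slices, with a check flag and result list mutated inside the loop) by a suffix-peeling containment test per trajectory (element-wise prefix check on each suffix, short-circuiting on mismatch) feeding a filter comprehension.
import Mathlib
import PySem

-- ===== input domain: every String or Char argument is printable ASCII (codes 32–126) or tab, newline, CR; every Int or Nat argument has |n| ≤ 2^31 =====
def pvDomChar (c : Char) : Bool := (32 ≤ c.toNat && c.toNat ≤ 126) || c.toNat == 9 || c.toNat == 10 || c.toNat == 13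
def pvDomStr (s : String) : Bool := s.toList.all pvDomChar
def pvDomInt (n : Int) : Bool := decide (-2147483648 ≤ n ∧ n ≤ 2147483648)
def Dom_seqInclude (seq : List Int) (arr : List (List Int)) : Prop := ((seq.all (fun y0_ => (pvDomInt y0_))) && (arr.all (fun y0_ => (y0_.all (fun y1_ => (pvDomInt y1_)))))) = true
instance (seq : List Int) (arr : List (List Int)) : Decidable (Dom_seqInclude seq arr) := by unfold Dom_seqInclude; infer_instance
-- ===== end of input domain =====

-- B replaces A's index-and-slice scan by a suffix-peeling prefix check per trajectory (alternative decomposition, same cost).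

-- ===== PORT A =====
-- inner while loop of A: state (res, check, pos_id); the extra fuel argument only makes the
-- loop total (fuel = len(trk)+1 bounds the number of iterations; the loop exits on its own
-- condition before fuel runs out) — it does not change the computation.
def seqIncludeLoop (seq trk : List Int) (res : List (List Int)) (check : Bool) (posId : Nat) : Nat → List (List Int)
  | 0 => res
  | fuel + 1 =>
    if check = true ∧ (posId : Int) ≤ (trk.length : Int) - (seq.length : Int) then
      if PySem.List.slice trk (some (posId : Int)) (some ((posId : Int) + (seq.length : Int))) == seq then
        seqIncludeLoop seq trk (res ++ [trk]) false (posId + 1) fuel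
      else
        seqIncludeLoop seq trk res check (posId + 1) fuel
    else res

def seqInclude (seq : List Int) (arr : List (List Int)) : List (List Int) :=
  arr.foldl (fun res trk => seqIncludeLoop seq trk res true 0 (trk.length + 1)) []

-- ===== PORT B =====
-- 'n <= len(t) and all(a == b for a, b in zip(seq, t))'
def bStarts (seq t : List Int) : Bool :=
  decide (seq.length ≤ t.length) && (List.zip seq t).all (fun p => p.1 == p.2)

-- the 'while True' suffix-peeling loop of contains
def bContains (seq : List Int) : List Int → Bool
  | [] => if bStarts seq [] then true else false
  | x :: t' => if bStarts seq (x :: t') then true else bContains seq t'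

def seqInclude_alt (seq : List Int) (arr : List (List Int)) : List (List Int) :=
  arr.filter (fun trk => bContains seq trk)

-- ===== PRECONDITION & SPEC =====
def Spec_seqInclude (seq : List Int) (arr : List (List Int)) (out : List (List Int)) : Prop := out = seqInclude_alt seq arr
instance (seq : List Int) (arr : List (List Int)) (out : List (List Int)) : Decidable (Spec_seqInclude seq arr out) := by unfold Spec_seqInclude; infer_instance

-- ===== CLAIM (what is proved, stated in full; the proofs are below) =====
def Claim_equal_seqInclude : Prop := ∀ (seq : List Int) (arr : List (List Int)), Dom_seqInclude seq arr → Spec_seqInclude seq arr (seqInclude seq arr)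

-- ===== LEMMAS AND PROOFS =====

-- bStarts holds exactly when seq is the length-|seq| prefix of t
theorem bStarts_iff (seq t : List Int) :
    bStarts seq t = true ↔ t.take seq.length = seq := by
  induction seq generalizing t with
  | nil => simp [bStarts]
  | cons a s ih =>
    cases t with
    | nil => simp [bStarts]
    | cons b t' =>
      simp only [bStarts, List.zip_cons_cons, List.all_cons, Bool.and_eq_true,
        decide_eq_true_eq, List.length_cons, List.take_succ_cons, List.cons.injEq,
        beq_iff_eq, List.all_eq_true] at ih ⊢
      constructor
      · rintro ⟨hlen, hab, hall⟩
        exact ⟨hab.symm, (ih t').mp ⟨by omega, hall⟩⟩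
      · rintro ⟨hba, hts⟩
        obtain ⟨hlen, hall⟩ := (ih t').mpr hts
        exact ⟨by omega, hba.symm, hall⟩

-- if the suffix is shorter than seq, bContains is false
theorem bContains_short (seq t : List Int) (h : t.length < seq.length) :
    bContains seq t = false := by
  induction t with
  | nil =>
    simp only [bContains]
    rw [if_neg]
    intro hs
    have := bStarts_iff seq [] |>.mp hs
    have := congrArg List.length this
    simp at this
    omega
  | cons x t' ih =>
    simp only [bContains]
    rw [if_neg, ih (by simp only [List.length_cons] at h; omega)]
    intro hs
    have := bStarts_iff seq (x :: t') |>.mp hs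
    have := congrArg List.length this
    simp only [List.length_cons] at h
    simp [List.length_take] at this
    omega

-- A's inner loop with check = false returns res unchanged
theorem seqIncludeLoop_false (seq trk : List Int) (res : List (List Int)) (posId : Nat) (fuel : Nat) :
    seqIncludeLoop seq trk res false posId fuel = res := by
  cases fuel <;> simp [seqIncludeLoop]

-- the key invariant: with enough fuel, A's inner loop from posId behaves as bContains on the dropped suffix
theorem seqIncludeLoop_eq (seq trk : List Int) (res : List (List Int)) (posId : Nat) (fuel : Nat)
    (hpos : posId ≤ trk.length) (hfuel : trk.length + 1 ≤ posId + fuel) :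
    seqIncludeLoop seq trk res true posId fuel =
      if bContains seq (trk.drop posId) then res ++ [trk] else res := by
  induction fuel generalizing res posId with
  | zero => omega
  | succ fuel ih =>
    by_cases hle : (posId : Int) ≤ (trk.length : Int) - (seq.length : Int)
    · rw [seqIncludeLoop]
      have hslice : PySem.List.slice trk (some (posId : Int)) (some ((posId : Int) + (seq.length : Int)))
          = (trk.drop posId).take seq.length := by
        simpa using PySem.List.slice_natCast_add trk posId seq.length
      rw [if_pos ⟨rfl, hle⟩, hslice]
      by_cases hmatch : (trk.drop posId).take seq.length = seq
      · rw [if_pos (by simpa using hmatch), seqIncludeLoop_false]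
        have hb : bContains seq (trk.drop posId) = true := by
          have hs : bStarts seq (trk.drop posId) = true := (bStarts_iff _ _).mpr hmatch
          cases hdp : trk.drop posId with
          | nil => rw [hdp] at hs; simp [bContains, hs]
          | cons x t' => rw [hdp] at hs; simp [bContains, hs]
        rw [hb]; simp
      · rw [if_neg (by simpa using hmatch)]
        have hseq : seq ≠ [] := by
          intro h; subst h; simp at hmatch
        have hn1 : 1 ≤ seq.length := by
          cases seq with
          | nil => exact absurd rfl hseq
          | cons _ _ => simp
        have hpos' : posId + 1 ≤ trk.length := by omega
        have hne : trk.drop posId ≠ [] := by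
          simp only [ne_eq, List.drop_eq_nil_iff]
          omega
        obtain ⟨x, t', hx⟩ := List.exists_cons_of_ne_nil hne
        have hdropsucc : trk.drop (posId + 1) = t' := by
          have h1 : (trk.drop posId).tail = trk.drop (posId + 1) := List.tail_drop
          rw [hx] at h1
          simpa using h1.symm
        have hs : bStarts seq (trk.drop posId) = false := by
          rw [Bool.eq_false_iff]
          intro h
          exact hmatch ((bStarts_iff _ _).mp h)
        rw [ih res (posId + 1) hpos' (by omega), hdropsucc]
        have : bContains seq (trk.drop posId) = bContains seq t' := by
          rw [hx]
          rw [hx] at hs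
          simp [bContains, hs]
        rw [this]
    · rw [seqIncludeLoop]
      rw [if_neg (by intro h; exact hle h.2)]
      have : bContains seq (trk.drop posId) = false := by
        apply bContains_short
        simp only [List.length_drop]
        omega
      rw [this]; simp

theorem foldl_eq_filter (seq : List Int) (arr : List (List Int)) (res : List (List Int)) :
    arr.foldl (fun res trk => seqIncludeLoop seq trk res true 0 (trk.length + 1)) res
      = res ++ arr.filter (fun trk => bContains seq trk) := by
  induction arr generalizing res with
  | nil => simp
  | cons trk arr' ih =>
    simp only [List.foldl_cons, List.filter_cons]
    rw [ih, seqIncludeLoop_eq seq trk res 0 (trk.length + 1) (by omega) (by omega)]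
    simp only [List.drop_zero]
    by_cases h : bContains seq trk = true
    · rw [if_pos h, h]; simp
    · rw [if_neg h, Bool.eq_false_iff.mpr h]; simp

-- ===== VERDICT (by name: the statement is the Claim_ definition above) =====
theorem seqInclude_spec : Claim_equal_seqInclude := by
  intro seq arr _
  unfold Spec_seqInclude seqInclude seqInclude_alt
  simpa using foldl_eq_filter seq arr []
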